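-- pv_equiv track=rewrite | github.com/azrael1865/Saraphis | independent_core/comprehensive_documentation.py | _extract_examples
-- ===== SOURCE A (Python) =====
-- from typing import Dict, List, Optional, Any, Set, Union, Tuple, Callable
--
-- def _extract_examples(content: str) -> List[str]:
--     """Extract usage examples from comments and docstrings"""
--     examples = []
--
--     example_indicators = ['example', 'usage', 'sample', 'demo']
--
--     in_example = False
--     current_example = []
--
--     for line in content.split('\n'):
--         line_lower = line.lower()
--
--         if any(indicator in line_lower for indicator in example_indicators):
--             if current_example:
--                 examples.append('\n'.join(current_example))
--             current_example = [line.strip()]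
--             in_example = True
--         elif in_example:
--             if line.strip().startswith('#') or line.strip().startswith('"""'):
--                 current_example.append(line.strip())
--             elif line.strip() == '':
--                 current_example.append('')
--             else:
--                 if current_example:
--                     examples.append('\n'.join(current_example))
--                 current_example = []
--                 in_example = False
--
--     if current_example:
--         examples.append('\n'.join(current_example))
--
--     return examples
-- ===== SOURCE B (Python) =====
-- def _extract_examples(content):
--     """Extract usage examples from comments and docstrings"""
--     indicators = ('example', 'usage', 'sample', 'demo')
--
--     def is_start(line):
--         low = line.lower()
--         return any(t in low for t in indicators)
--
--     lines = content.split('\n')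
--     examples = []
--     i, n = 0, len(lines)
--     while i < n:
--         if not is_start(lines[i]):
--             i += 1
--             continue
--         block = [lines[i].strip()]
--         i += 1
--         while i < n and not is_start(lines[i]):
--             s = lines[i].strip()
--             if not (s == '' or s.startswith('#') or s.startswith('"""')):
--                 break
--             block.append(s)
--             i += 1
--         examples.append('\n'.join(block))
--     return examples
-- ===== Notes on version B (the rewrite author's own statement) =====
-- stated objective: alternative
-- what changed: Replaced A's single pass with an in_example flag and mutable current_example state by a nested parser: an outer scan that skips to an indicator line and an inner loop that consumes the continuation block before flushing it.
import Mathlib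
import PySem

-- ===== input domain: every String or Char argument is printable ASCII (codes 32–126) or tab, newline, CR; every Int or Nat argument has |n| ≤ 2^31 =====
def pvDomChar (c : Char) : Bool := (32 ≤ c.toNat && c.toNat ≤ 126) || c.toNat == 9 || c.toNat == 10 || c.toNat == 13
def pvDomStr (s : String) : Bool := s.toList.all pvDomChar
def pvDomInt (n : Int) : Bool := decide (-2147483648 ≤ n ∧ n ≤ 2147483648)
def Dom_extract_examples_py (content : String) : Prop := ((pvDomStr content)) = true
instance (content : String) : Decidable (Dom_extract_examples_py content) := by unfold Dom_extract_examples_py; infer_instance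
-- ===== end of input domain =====

-- B replaces A's in_example-flag state machine by a nested start-then-consume-block scan (different decomposition, same cost).

-- ===== PORT A =====
-- A's indicator list and its `any(indicator in line_lower …)` test
def aIndicators : List String := ["example", "usage", "sample", "demo"]

-- the for-loop of A, state = (examples, current_example, in_example)
def aLoop : List String → List String → List String → Bool → List String
  | [], ex, cur, _ =>
      if cur.isEmpty then ex else ex ++ [PySem.Str.join "\n" cur]
  | l :: ls, ex, cur, inex =>
      let ll := PySem.Str.lower l
      if aIndicators.any (fun t => PySem.Str.isIn t ll) then
        aLoop ls (if cur.isEmpty then ex else ex ++ [PySem.Str.join "\n" cur])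
          [PySem.Str.strip l] true
      else if inex then
        if PySem.Str.startswith (PySem.Str.strip l) "#" ||
           PySem.Str.startswith (PySem.Str.strip l) "\"\"\"" then
          aLoop ls ex (cur ++ [PySem.Str.strip l]) true
        else if PySem.Str.strip l == "" then
          aLoop ls ex (cur ++ [""]) true
        else
          aLoop ls (if cur.isEmpty then ex else ex ++ [PySem.Str.join "\n" cur]) [] false
      else aLoop ls ex cur inex

def extract_examples_py (content : String) : List String :=
  aLoop (((PySem.Str.split? content "\n").getD [])) [] [] false

-- ===== PORT B =====
def bIndicators : List String := ["example", "usage", "sample", "demo"]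

def bIsStart (l : String) : Bool :=
  bIndicators.any (fun t => PySem.Str.isIn t (PySem.Str.lower l))

-- B's inner loop: consume continuation lines, return (block, remaining lines)
def bInner : List String → List String → List String × List String
  | [], block => (block, [])
  | l :: ls, block =>
      if bIsStart l then (block, l :: ls)
      else
        let s := PySem.Str.strip l
        if s == "" || PySem.Str.startswith s "#" || PySem.Str.startswith s "\"\"\"" then
          bInner ls (block ++ [s])
        else (block, l :: ls)

theorem bInner_rest_le (ls block : List String) : (bInner ls block).2.length ≤ ls.length := by
  induction ls generalizing block with
  | nil => simp [bInner]
  | cons l ls ih =>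
      simp only [bInner]
      split
      · simp
      · split
        · exact le_trans (ih _) (Nat.le_succ _)
        · simp

-- B's outer loop: skip until a start line, consume a block, flush, continue
def bOuter : List String → List String
  | [] => []
  | l :: ls =>
      if bIsStart l then
        let p := bInner ls [PySem.Str.strip l]
        PySem.Str.join "\n" p.1 :: bOuter p.2
      else bOuter ls
termination_by ls => ls.length
decreasing_by
  · exact Nat.lt_succ_of_le (bInner_rest_le _ _)
  · simp

def extract_examples_py_alt (content : String) : List String :=
  bOuter (((PySem.Str.split? content "\n").getD []))

-- ===== PRECONDITION & SPEC =====
def Spec_extract_examples_py (content : String) (out : List String) : Prop := out = extract_examples_py_alt content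
instance (content : String) (out : List String) : Decidable (Spec_extract_examples_py content out) := by unfold Spec_extract_examples_py; infer_instance

-- ===== CLAIM (what is proved, stated in full; the proofs are below) =====
def Claim_equal_extract_examples_py : Prop := ∀ (content : String), Dom_extract_examples_py content → Spec_extract_examples_py content (extract_examples_py content)

-- ===== LEMMAS AND PROOFS =====

-- A's two loop modes correspond to B's outer scan and inner block-consumption
theorem aLoop_eq_b (ls : List String) :
    (∀ acc, aLoop ls acc [] false = acc ++ bOuter ls) ∧
    (∀ acc cur, cur ≠ [] →
      aLoop ls acc cur true =
        acc ++ (PySem.Str.join "\n" (bInner ls cur).1 :: bOuter (bInner ls cur).2)) := by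
  induction ls with
  | nil =>
      constructor
      · intro acc; simp [aLoop, bOuter]
      · intro acc cur hcur
        simp [aLoop, bInner, bOuter, List.isEmpty_eq_false_iff.mpr hcur]
  | cons l ls ih =>
      obtain ⟨ih1, ih2⟩ := ih
      have hstart := fun (h : bIsStart l = true) =>
        (show (aIndicators.any (fun t => PySem.Str.isIn t (PySem.Str.lower l))) = true from h)
      constructor
      · intro acc
        cases hs : bIsStart l with
        | true =>
            simp only [aLoop, bOuter, hstart hs, hs, if_true, List.isEmpty_nil]
            rw [ih2 acc [PySem.Str.strip l] (by simp)]
        | false =>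
            have ha : aIndicators.any (fun t => PySem.Str.isIn t (PySem.Str.lower l)) = false := hs
            simp only [aLoop, bOuter, ha, hs, Bool.false_eq_true, if_false]
            exact ih1 acc
      · intro acc cur hcur
        have hne : cur.isEmpty = false := List.isEmpty_eq_false_iff.mpr hcur
        cases hs : bIsStart l with
        | true =>
            simp only [aLoop, bInner, bOuter, hstart hs, hs, if_true, hne,
              Bool.false_eq_true, if_false]
            rw [ih2 _ [PySem.Str.strip l] (by simp), List.append_assoc]
            simp
        | false =>
            have ha : aIndicators.any (fun t => PySem.Str.isIn t (PySem.Str.lower l)) = false := hs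
            cases hb1 : PySem.Str.startswith (PySem.Str.strip l) "#" with
            | true =>
                simp only [aLoop, bInner, ha, hs, hb1, Bool.false_eq_true, if_false,
                  if_true, Bool.true_or, Bool.or_true]
                exact ih2 acc (cur ++ [PySem.Str.strip l]) (by simp)
            | false =>
                cases hb2 : PySem.Str.startswith (PySem.Str.strip l) "\"\"\"" with
                | true =>
                    simp only [aLoop, bInner, ha, hs, hb1, hb2, Bool.false_eq_true,
                      if_false, if_true, Bool.or_false, Bool.or_true]
                    exact ih2 acc (cur ++ [PySem.Str.strip l]) (by simp)
                | false =>
                    cases hb0 : (PySem.Str.strip l == "") with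
                    | true =>
                        have hseq : PySem.Str.strip l = "" := by
                          simpa using hb0
                        simp only [aLoop, bInner, ha, hs, hb1, hb2, hb0,
                          Bool.false_eq_true, if_false, if_true, Bool.or_false]
                        rw [hseq]
                        exact ih2 acc (cur ++ [""]) (by simp)
                    | false =>
                        simp only [aLoop, bInner, bOuter, ha, hs, hb1, hb2, hb0, hne,
                          Bool.false_eq_true, if_false, Bool.or_false]
                        rw [ih1 (acc ++ [PySem.Str.join "\n" cur])]
                        simp

-- ===== VERDICT (by name: the statement is the Claim_ definition above) =====
theorem extract_examples_py_spec : Claim_equal_extract_examples_py := by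
  intro content _
  unfold Spec_extract_examples_py extract_examples_py extract_examples_py_alt
  simpa using (aLoop_eq_b (((PySem.Str.split? content "\n").getD []))).1 []
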